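-- pv_equiv track=rewrite | github.com/drake69/spendify | support/formatting.py | strftime_to_momentjs
-- ===== SOURCE A (Python) =====
-- def strftime_to_momentjs(fmt: str) -> str:
--     """Convert a Python strftime format string to Moment.js tokens.
--
--     Needed because Streamlit DateColumn renders dates on the frontend
--     using Moment.js, not Python strftime.
--     """
--     _MAP = {
--         "%d": "DD", "%m": "MM", "%Y": "YYYY", "%y": "YY",
--         "%B": "MMMM", "%b": "MMM", "%A": "dddd", "%a": "ddd",
--         "%H": "HH", "%I": "hh", "%M": "mm", "%S": "ss", "%p": "A",
--     }
--     result = fmt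
--     for py_tok, mj_tok in _MAP.items():
--         result = result.replace(py_tok, mj_tok)
--     return result
-- ===== SOURCE B (Python) =====
-- def strftime_to_momentjs(fmt: str) -> str:
--     """Convert a Python strftime format string to Moment.js tokens.
--
--     Single left-to-right scan over fmt instead of 13 chained replaces.
--     """
--     _MAP = {
--         "d": "DD", "m": "MM", "Y": "YYYY", "y": "YY",
--         "B": "MMMM", "b": "MMM", "A": "dddd", "a": "ddd",
--         "H": "HH", "I": "hh", "M": "mm", "S": "ss", "p": "A",
--     }
--     out = []
--     i = 0
--     n = len(fmt)
--     while i < n: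
--         ch = fmt[i]
--         if ch == "%" and i + 1 < n and fmt[i + 1] in _MAP:
--             out.append(_MAP[fmt[i + 1]])
--             i += 2
--         else:
--             out.append(ch)
--             i += 1
--     return "".join(out)
-- ===== Notes on version B (the rewrite author's own statement) =====
-- stated objective: alternative
-- what changed: Replaced A's 13 sequential str.replace passes over the whole string with a single left-to-right index scan that emits each token (or literal character) exactly once.
-- intended difference: On inputs containing "%%m", "%%B" or "%%b", a later replace in A re-matches text produced by an earlier replace (A("%%m") = "mmM"), while B treats the leading '%' as a literal and returns "%MM", the intended Moment.js rendering. — e.g. on strftime_to_momentjs("%%m"): A returns "mmM", B returns "%MM"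
import Mathlib
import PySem

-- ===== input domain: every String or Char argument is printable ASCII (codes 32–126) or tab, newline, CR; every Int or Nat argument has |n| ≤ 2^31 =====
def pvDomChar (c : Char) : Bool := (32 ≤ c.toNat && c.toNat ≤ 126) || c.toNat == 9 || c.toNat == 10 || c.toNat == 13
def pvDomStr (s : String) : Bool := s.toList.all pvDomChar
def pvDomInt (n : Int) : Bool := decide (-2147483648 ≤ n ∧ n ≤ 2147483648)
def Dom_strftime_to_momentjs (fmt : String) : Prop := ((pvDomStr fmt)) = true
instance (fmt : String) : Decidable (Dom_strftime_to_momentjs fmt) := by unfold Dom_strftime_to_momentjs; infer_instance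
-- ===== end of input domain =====

-- B replaces A's 13 chained str.replace passes with one left-to-right scan over the
-- format string (alternative decomposition; on "%%m"/"%%B"/"%%b" inputs A's later
-- replace re-matches text produced by an earlier one, B leaves the literal '%' alone).

-- ===== PORT A =====
def mapPairsA : List (String × String) :=
  [("%d","DD"),("%m","MM"),("%Y","YYYY"),("%y","YY"),("%B","MMMM"),("%b","MMM"),
   ("%A","dddd"),("%a","ddd"),("%H","HH"),("%I","hh"),("%M","mm"),("%S","ss"),("%p","A")]

def strftime_to_momentjs (fmt : String) : String :=
  mapPairsA.foldl (fun result p => PySem.Str.replace result p.1 p.2) fmt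

-- ===== PORT B =====
def tokMapB : List (Char × List Char) :=
  [('d',['D','D']),('m',['M','M']),('Y',['Y','Y','Y','Y']),('y',['Y','Y']),
   ('B',['M','M','M','M']),('b',['M','M','M']),('A',['d','d','d','d']),('a',['d','d','d']),
   ('H',['H','H']),('I',['h','h']),('M',['m','m']),('S',['s','s']),('p',['A'])]

def scanB : List Char → List Char
  | [] => []
  | c :: t =>
    if c = '%' then
      match t with
      | [] => ['%']
      | c2 :: t2 =>
        match tokMapB.lookup c2 with
        | some v => v ++ scanB t2
        | none => '%' :: scanB (c2 :: t2)
    else c :: scanB t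

def strftime_to_momentjs_alt (fmt : String) : String :=
  String.ofList (scanB fmt.toList)

-- ===== PRECONDITION & SPEC =====
-- On inputs containing "%%m", "%%B" or "%%b" A's chained replaces re-match output of an
-- earlier replace (e.g. A("%%m") = "mmM"), while B leaves the literal '%' alone and
-- returns "%MM", which is the intended Moment.js rendering.
def D_strftime_to_momentjs (fmt : String) : Prop :=
  PySem.Str.isIn "%%m" fmt = true ∨ PySem.Str.isIn "%%B" fmt = true ∨ PySem.Str.isIn "%%b" fmt = true
instance (fmt : String) : Decidable (D_strftime_to_momentjs fmt) := by
  unfold D_strftime_to_momentjs; infer_instance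

def Spec_strftime_to_momentjs (fmt : String) (out : String) : Prop :=
  ¬ D_strftime_to_momentjs fmt → out = strftime_to_momentjs_alt fmt
instance (fmt : String) (out : String) : Decidable (Spec_strftime_to_momentjs fmt out) := by
  unfold Spec_strftime_to_momentjs; infer_instance

def pvDiffWitness_strftime_to_momentjs : String := "%%m"
def pvDiffWitnessOut_strftime_to_momentjs : String × String := ("mmM", "%MM")

-- ===== CLAIM (what is proved, stated in full; the proofs are below) =====
def Claim_unchanged_strftime_to_momentjs : Prop :=
  ∀ (fmt : String), Dom_strftime_to_momentjs fmt →
    Spec_strftime_to_momentjs fmt (strftime_to_momentjs fmt)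
def Claim_changed_strftime_to_momentjs : Prop :=
  Dom_strftime_to_momentjs (pvDiffWitness_strftime_to_momentjs) ∧
  D_strftime_to_momentjs (pvDiffWitness_strftime_to_momentjs) ∧
  strftime_to_momentjs (pvDiffWitness_strftime_to_momentjs) = pvDiffWitnessOut_strftime_to_momentjs.1 ∧
  strftime_to_momentjs_alt (pvDiffWitness_strftime_to_momentjs) = pvDiffWitnessOut_strftime_to_momentjs.2 ∧
  pvDiffWitnessOut_strftime_to_momentjs.1 ≠ pvDiffWitnessOut_strftime_to_momentjs.2
def Claim_exact_strftime_to_momentjs : Prop :=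
  ∀ (fmt : String), Dom_strftime_to_momentjs fmt → D_strftime_to_momentjs fmt →
    strftime_to_momentjs fmt ≠ strftime_to_momentjs_alt fmt

-- ===== LEMMAS AND PROOFS =====

-- single-replace recursion mirroring PySem.Chars.replace.go for a 2-char pattern ['%', k]
def repAux (k : Char) (v : List Char) : List Char → List Char
  | [] => []
  | c :: t => if ['%', k].isPrefixOf (c :: t) then v ++ repAux k v t.tail else c :: repAux k v t
termination_by l => l.length
decreasing_by
  all_goals simp [List.length_tail]

lemma go_eq_repAux (k : Char) (v : List Char) :
    ∀ (fuel : Nat) (l acc : List Char), l.length ≤ fuel →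
      PySem.Chars.replace.go ['%', k] v fuel l acc = acc.reverse ++ repAux k v l := by
  intro fuel
  induction fuel with
  | zero =>
    intro l acc h
    have : l = [] := List.eq_nil_of_length_eq_zero (Nat.le_zero.mp h)
    subst this
    simp [PySem.Chars.replace.go, repAux]
  | succ n ih =>
    intro l acc h
    cases l with
    | nil => simp [PySem.Chars.replace.go, repAux]
    | cons c t =>
      by_cases hp : (['%', k].isPrefixOf (c :: t)) = true
      · rw [PySem.Chars.replace.go]
        simp only [hp, if_true]
        have hdrop : List.drop (['%', k] : List Char).length (c :: t) = t.tail := by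
          cases t <;> simp
        have hlen : t.tail.length ≤ n := by
          simp only [List.length_cons] at h
          cases t with
          | nil => simp
          | cons d t' => simp only [List.tail_cons]; simp at h ⊢; omega
        rw [hdrop, ih _ _ hlen]
        rw [repAux]
        simp [hp]
      · rw [PySem.Chars.replace.go]
        simp only [hp, if_false, Bool.false_eq_true]
        have hlen : t.length ≤ n := by simp only [List.length_cons] at h; omega
        rw [ih _ _ hlen]
        rw [repAux]
        simp [hp]

lemma replace_eq_repAux (k : Char) (v l : List Char) :
    PySem.Chars.replace l ['%', k] v = repAux k v l := by
  rw [PySem.Chars.replace]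
  simp only [List.isEmpty_cons, if_false, Bool.false_eq_true]
  rw [go_eq_repAux k v l.length l [] (le_refl _)]
  simp

@[simp] lemma repAux_nil (k : Char) (v : List Char) : repAux k v [] = [] := by
  rw [repAux]

@[simp] lemma repAux_cons_ne (k : Char) (v : List Char) (c : Char) (t : List Char)
    (h : c ≠ '%') : repAux k v (c :: t) = c :: repAux k v t := by
  rw [repAux]
  have : (['%', k].isPrefixOf (c :: t)) = false := by
    simp [List.isPrefixOf, Ne.symm h]
  simp [this]

@[simp] lemma repAux_match (k : Char) (v : List Char) (t : List Char) :
    repAux k v ('%' :: k :: t) = v ++ repAux k v t := by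
  rw [repAux]
  simp [List.isPrefixOf]

@[simp] lemma repAux_pct_ne (k : Char) (v : List Char) (c : Char) (t : List Char)
    (h : c ≠ k) : repAux k v ('%' :: c :: t) = '%' :: repAux k v (c :: t) := by
  rw [repAux]
  simp [List.isPrefixOf, Ne.symm h]

@[simp] lemma repAux_single (k : Char) (v : List Char) : repAux k v ['%'] = ['%'] := by
  rw [repAux]
  simp [List.isPrefixOf, repAux_nil]

-- run lemmas: behaviour of one replace on a run of '%' characters
lemma replicate_two_cons (a : Nat) :
    List.replicate (a + 2) '%' = '%' :: '%' :: List.replicate a '%' := by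
  simp [List.replicate_succ]

lemma repAux_run_pct (k : Char) (v : List Char) (hk : k ≠ '%') :
    ∀ a, repAux k v (List.replicate a '%') = List.replicate a '%' := by
  intro a
  induction a with
  | zero => simp
  | succ a ih =>
    cases a with
    | zero => simp [List.replicate]
    | succ a' =>
      rw [replicate_two_cons]
      rw [repAux_pct_ne k v '%' _ (Ne.symm hk)]
      have : ('%' :: List.replicate a' '%' : List Char) = List.replicate (a' + 1) '%' := by
        simp [List.replicate_succ]
      rw [this, ih, ← this]

lemma repAux_run_peel (k : Char) (v : List Char) (c : Char) (r : List Char)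
    (hk : k ≠ '%') (hc : c ≠ '%') (hck : c ≠ k) :
    ∀ a, repAux k v (List.replicate a '%' ++ c :: r) =
      List.replicate a '%' ++ c :: repAux k v r := by
  intro a
  induction a with
  | zero => simp [hc]
  | succ a ih =>
    cases a with
    | zero => simp [List.replicate, hck, hc]
    | succ a' =>
      rw [replicate_two_cons]
      simp only [List.cons_append]
      rw [repAux_pct_ne k v '%' _ (Ne.symm hk)]
      have e1 : ('%' :: (List.replicate a' '%' ++ c :: r) : List Char) =
          List.replicate (a' + 1) '%' ++ c :: r := by
        simp [List.replicate_succ]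
      rw [e1, ih]
      simp [List.replicate_succ]

lemma repAux_run_match (k : Char) (v : List Char) (r : List Char) (hk : k ≠ '%') :
    ∀ a, repAux k v (List.replicate (a + 1) '%' ++ k :: r) =
      List.replicate a '%' ++ v ++ repAux k v r := by
  intro a
  induction a with
  | zero => simp [List.replicate]
  | succ a ih =>
    rw [replicate_two_cons]
    simp only [List.cons_append]
    rw [repAux_pct_ne k v '%' _ (Ne.symm hk)]
    have e1 : ('%' :: (List.replicate a '%' ++ k :: r) : List Char) =
        List.replicate (a + 1) '%' ++ k :: r := by
      simp [List.replicate_succ]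
    rw [e1, ih]
    have e2 : (List.replicate (a + 1) '%' : List Char) = '%' :: List.replicate a '%' := by
      simp [List.replicate_succ]
    rw [e2]
    simp


-- A's fold, moved to the List Char level (pairsC is mapPairsA with strings as char lists)
def pairsC : List (List Char × List Char) :=
  [(['%','d'],['D','D']),(['%','m'],['M','M']),(['%','Y'],['Y','Y','Y','Y']),(['%','y'],['Y','Y']),(['%','B'],['M','M','M','M']),(['%','b'],['M','M','M']),(['%','A'],['d','d','d','d']),(['%','a'],['d','d','d']),(['%','H'],['H','H']),(['%','I'],['h','h']),(['%','M'],['m','m']),(['%','S'],['s','s']),(['%','p'],['A'])]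

def chainL (l : List Char) : List Char :=
  pairsC.foldl (fun r p => PySem.Chars.replace r p.1 p.2) l

-- scanB step lemmas
lemma scan_nil : scanB [] = [] := by simp [scanB]

lemma scan_cons_ne (c : Char) (t : List Char) (hc : c ≠ '%') :
    scanB (c :: t) = c :: scanB t := by
  rw [scanB.eq_def]; simp [hc]

lemma scan_pct_nil : scanB ['%'] = ['%'] := by rw [scanB.eq_def]; simp

lemma scan_key (c2 : Char) (v : List Char) (t : List Char)
    (hv : tokMapB.lookup c2 = some v) : scanB ('%' :: c2 :: t) = v ++ scanB t := by
  rw [scanB.eq_def]; simp [hv]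

lemma scan_nonkey (c2 : Char) (t : List Char)
    (hv : tokMapB.lookup c2 = none) : scanB ('%' :: c2 :: t) = '%' :: scanB (c2 :: t) := by
  rw [scanB.eq_def]; simp [hv]

lemma lookup_pct_none : tokMapB.lookup '%' = none := by decide

lemma scan_run_pct : ∀ a, scanB (List.replicate a '%') = List.replicate a '%' := by
  intro a
  induction a with
  | zero => simp [scan_nil]
  | succ a ih =>
    cases a with
    | zero => simp [List.replicate, scan_pct_nil]
    | succ a' =>
      rw [replicate_two_cons]
      rw [show ('%' :: '%' :: List.replicate a' '%' : List Char) =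
        '%' :: ('%' :: List.replicate a' '%') from rfl]
      rw [scan_nonkey _ _ lookup_pct_none]
      have e : ('%' :: List.replicate a' '%' : List Char) = List.replicate (a' + 1) '%' := by
        simp [List.replicate_succ]
      rw [e, ih, ← e]

lemma scan_run_key (c : Char) (v : List Char) (hv : tokMapB.lookup c = some v) :
    ∀ a (r : List Char), scanB (List.replicate (a + 1) '%' ++ c :: r) =
      List.replicate a '%' ++ v ++ scanB r := by
  intro a
  induction a with
  | zero => intro r; simp [List.replicate, scan_key _ _ _ hv]
  | succ a ih =>
    intro r
    rw [replicate_two_cons]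
    simp only [List.cons_append]
    rw [scan_nonkey _ _ lookup_pct_none]
    have e : ('%' :: (List.replicate a '%' ++ c :: r) : List Char) =
        List.replicate (a + 1) '%' ++ c :: r := by
      simp [List.replicate_succ]
    rw [e, ih]
    simp [List.replicate_succ]

lemma scan_run_nonkey (c : Char) (hv : tokMapB.lookup c = none) (hc : c ≠ '%') :
    ∀ a (r : List Char), scanB (List.replicate a '%' ++ c :: r) =
      List.replicate a '%' ++ c :: scanB r := by
  intro a
  induction a with
  | zero => intro r; simp [scan_cons_ne _ _ hc]
  | succ a ih =>
    intro r
    cases a with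
    | zero =>
      simp only [List.replicate, List.cons_append, List.nil_append]
      rw [scan_nonkey _ _ hv, scan_cons_ne _ _ hc]
    | succ a' =>
      rw [replicate_two_cons]
      simp only [List.cons_append]
      rw [scan_nonkey _ _ lookup_pct_none]
      have e : ('%' :: (List.replicate a' '%' ++ c :: r) : List Char) =
          List.replicate (a' + 1) '%' ++ c :: r := by
        simp [List.replicate_succ]
      rw [e, ih]
      simp [List.replicate_succ]

-- chainL (all 13 replaces) step lemmas
lemma chain_nil : chainL [] = [] := by simp [chainL, pairsC, replace_eq_repAux]

lemma chain_cons_ne (c : Char) (t : List Char) (hc : c ≠ '%') :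
    chainL (c :: t) = c :: chainL t := by
  simp [chainL, pairsC, replace_eq_repAux, hc]

lemma chain_run_pct (a : Nat) : chainL (List.replicate a '%') = List.replicate a '%' := by
  simp [chainL, pairsC, replace_eq_repAux, repAux_run_pct]

lemma chain_run_nonkey (a : Nat) (c : Char) (r : List Char) (hc : c ≠ '%')
    (h0 : c ≠ 'd') (h1 : c ≠ 'm') (h2 : c ≠ 'Y') (h3 : c ≠ 'y') (h4 : c ≠ 'B') (h5 : c ≠ 'b') (h6 : c ≠ 'A') (h7 : c ≠ 'a') (h8 : c ≠ 'H') (h9 : c ≠ 'I') (h10 : c ≠ 'M') (h11 : c ≠ 'S') (h12 : c ≠ 'p') :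
    chainL (List.replicate a '%' ++ c :: r) = List.replicate a '%' ++ c :: chainL r := by
  simp [chainL, pairsC, replace_eq_repAux, repAux_run_peel, hc, h0, h1, h2, h3, h4, h5, h6, h7, h8, h9, h10, h11, h12]

lemma chain_run_d (a : Nat) (r : List Char) :
    chainL (List.replicate (a + 1) '%' ++ 'd' :: r) =
      List.replicate a '%' ++ 'D'::'D' :: chainL r := by
  simp [chainL, pairsC, replace_eq_repAux, repAux_run_peel, repAux_run_match]

lemma chain_run_Y (a : Nat) (r : List Char) :
    chainL (List.replicate (a + 1) '%' ++ 'Y' :: r) =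
      List.replicate a '%' ++ 'Y'::'Y'::'Y'::'Y' :: chainL r := by
  simp [chainL, pairsC, replace_eq_repAux, repAux_run_peel, repAux_run_match]

lemma chain_run_y (a : Nat) (r : List Char) :
    chainL (List.replicate (a + 1) '%' ++ 'y' :: r) =
      List.replicate a '%' ++ 'Y'::'Y' :: chainL r := by
  simp [chainL, pairsC, replace_eq_repAux, repAux_run_peel, repAux_run_match]

lemma chain_run_A (a : Nat) (r : List Char) :
    chainL (List.replicate (a + 1) '%' ++ 'A' :: r) =
      List.replicate a '%' ++ 'd'::'d'::'d'::'d' :: chainL r := by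
  simp [chainL, pairsC, replace_eq_repAux, repAux_run_peel, repAux_run_match]

lemma chain_run_a (a : Nat) (r : List Char) :
    chainL (List.replicate (a + 1) '%' ++ 'a' :: r) =
      List.replicate a '%' ++ 'd'::'d'::'d' :: chainL r := by
  simp [chainL, pairsC, replace_eq_repAux, repAux_run_peel, repAux_run_match]

lemma chain_run_H (a : Nat) (r : List Char) :
    chainL (List.replicate (a + 1) '%' ++ 'H' :: r) =
      List.replicate a '%' ++ 'H'::'H' :: chainL r := by
  simp [chainL, pairsC, replace_eq_repAux, repAux_run_peel, repAux_run_match]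

lemma chain_run_I (a : Nat) (r : List Char) :
    chainL (List.replicate (a + 1) '%' ++ 'I' :: r) =
      List.replicate a '%' ++ 'h'::'h' :: chainL r := by
  simp [chainL, pairsC, replace_eq_repAux, repAux_run_peel, repAux_run_match]

lemma chain_run_M (a : Nat) (r : List Char) :
    chainL (List.replicate (a + 1) '%' ++ 'M' :: r) =
      List.replicate a '%' ++ 'm'::'m' :: chainL r := by
  simp [chainL, pairsC, replace_eq_repAux, repAux_run_peel, repAux_run_match]

lemma chain_run_S (a : Nat) (r : List Char) :
    chainL (List.replicate (a + 1) '%' ++ 'S' :: r) =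
      List.replicate a '%' ++ 's'::'s' :: chainL r := by
  simp [chainL, pairsC, replace_eq_repAux, repAux_run_peel, repAux_run_match]

lemma chain_run_p (a : Nat) (r : List Char) :
    chainL (List.replicate (a + 1) '%' ++ 'p' :: r) =
      List.replicate a '%' ++ 'A' :: chainL r := by
  simp [chainL, pairsC, replace_eq_repAux, repAux_run_peel, repAux_run_match]

lemma chain_one_m (r : List Char) :
    chainL ('%' :: 'm' :: r) = 'M'::'M' :: chainL r := by
  simp [chainL, pairsC, replace_eq_repAux]

lemma chain_one_B (r : List Char) :
    chainL ('%' :: 'B' :: r) = 'M'::'M'::'M'::'M' :: chainL r := by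
  simp [chainL, pairsC, replace_eq_repAux]

lemma chain_one_b (r : List Char) :
    chainL ('%' :: 'b' :: r) = 'M'::'M'::'M' :: chainL r := by
  simp [chainL, pairsC, replace_eq_repAux]

-- the change region on the list side
def badL (l : List Char) : Prop :=
  ['%','%','m'] <:+: l ∨ ['%','%','B'] <:+: l ∨ ['%','%','b'] <:+: l

lemma not_badL_of_suffix (l r : List Char) (h : r <:+ l) (hb : ¬ badL l) : ¬ badL r := by
  intro hr
  exact hb (hr.imp (·.trans h.isInfix) (·.imp (·.trans h.isInfix) (·.trans h.isInfix)))

lemma pct_run_decomp : ∀ (l : List Char), l.head? = some '%' →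
    ∃ a r, l = List.replicate (a + 1) '%' ++ r ∧ r.head? ≠ some '%' := by
  intro l
  induction l with
  | nil => intro h; simp at h
  | cons c t ih =>
    intro h
    simp only [List.head?_cons, Option.some.injEq] at h
    subst h
    by_cases ht : t.head? = some '%'
    · obtain ⟨a, r, hl, hr⟩ := ih ht
      exact ⟨a + 1, r, by rw [hl]; simp [List.replicate_succ], hr⟩
    · exact ⟨0, t, by simp [List.replicate], ht⟩

lemma chain_eq_scan : ∀ (n : Nat) (l : List Char), l.length ≤ n → ¬ badL l →
    chainL l = scanB l := by
  intro n
  induction n with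
  | zero =>
    intro l h _
    have : l = [] := List.eq_nil_of_length_eq_zero (Nat.le_zero.mp h)
    subst this
    rw [chain_nil, scan_nil]
  | succ n ih =>
    intro l hlen hbad
    cases hl0 : l with
    | nil => rw [chain_nil, scan_nil]
    | cons c t =>
      subst hl0
      by_cases hc : c = '%'
      · subst hc
        obtain ⟨a, r, hl, hr⟩ := pct_run_decomp ('%' :: t) (by simp)
        rw [hl] at hbad hlen ⊢
        cases r with
        | nil => simp only [List.append_nil]; rw [chain_run_pct, scan_run_pct]
        | cons c2 r' =>
          have hc2 : c2 ≠ '%' := by intro h; exact hr (by simp [h])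
          have hlen' : r'.length ≤ n := by
            simp only [List.length_append, List.length_replicate, List.length_cons] at hlen
            omega
          have hbad' : ¬ badL r' := not_badL_of_suffix _ r'
            ⟨List.replicate (a + 1) '%' ++ [c2], by simp⟩ hbad
          have ihr : chainL r' = scanB r' := ih r' hlen' hbad'
          by_cases hk_d : c2 = 'd'
          · subst hk_d
            rw [chain_run_d, scan_run_key _ _ (show tokMapB.lookup 'd' = some ['D','D'] by decide)]
            rw [ihr]
            simp
          by_cases hk_m : c2 = 'm'
          · subst hk_m
            cases a with
            | zero =>
              simp only [List.replicate, List.cons_append, List.nil_append]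
              rw [chain_one_m, scan_key _ _ _ (show tokMapB.lookup 'm' = some ['M','M'] by decide)]
              rw [ihr]
              simp
            | succ a' =>
              exfalso
              apply hbad
              refine Or.inl ⟨List.replicate a' '%', r', ?_⟩
              rw [show a' + 1 + 1 = a' + 2 from rfl, show (List.replicate (a' + 2) '%' : List Char) =
                List.replicate a' '%' ++ List.replicate 2 '%' from by rw [← List.replicate_add]]
              simp
          by_cases hk_Y : c2 = 'Y'
          · subst hk_Y
            rw [chain_run_Y, scan_run_key _ _ (show tokMapB.lookup 'Y' = some ['Y','Y','Y','Y'] by decide)]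
            rw [ihr]
            simp
          by_cases hk_y : c2 = 'y'
          · subst hk_y
            rw [chain_run_y, scan_run_key _ _ (show tokMapB.lookup 'y' = some ['Y','Y'] by decide)]
            rw [ihr]
            simp
          by_cases hk_B : c2 = 'B'
          · subst hk_B
            cases a with
            | zero =>
              simp only [List.replicate, List.cons_append, List.nil_append]
              rw [chain_one_B, scan_key _ _ _ (show tokMapB.lookup 'B' = some ['M','M','M','M'] by decide)]
              rw [ihr]
              simp
            | succ a' =>
              exfalso
              apply hbad
              refine Or.inr (Or.inl ⟨List.replicate a' '%', r', ?_⟩)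
              rw [show a' + 1 + 1 = a' + 2 from rfl, show (List.replicate (a' + 2) '%' : List Char) =
                List.replicate a' '%' ++ List.replicate 2 '%' from by rw [← List.replicate_add]]
              simp
          by_cases hk_b : c2 = 'b'
          · subst hk_b
            cases a with
            | zero =>
              simp only [List.replicate, List.cons_append, List.nil_append]
              rw [chain_one_b, scan_key _ _ _ (show tokMapB.lookup 'b' = some ['M','M','M'] by decide)]
              rw [ihr]
              simp
            | succ a' =>
              exfalso
              apply hbad
              refine Or.inr (Or.inr ⟨List.replicate a' '%', r', ?_⟩)
              rw [show a' + 1 + 1 = a' + 2 from rfl, show (List.replicate (a' + 2) '%' : List Char) =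
                List.replicate a' '%' ++ List.replicate 2 '%' from by rw [← List.replicate_add]]
              simp
          by_cases hk_A : c2 = 'A'
          · subst hk_A
            rw [chain_run_A, scan_run_key _ _ (show tokMapB.lookup 'A' = some ['d','d','d','d'] by decide)]
            rw [ihr]
            simp
          by_cases hk_a : c2 = 'a'
          · subst hk_a
            rw [chain_run_a, scan_run_key _ _ (show tokMapB.lookup 'a' = some ['d','d','d'] by decide)]
            rw [ihr]
            simp
          by_cases hk_H : c2 = 'H'
          · subst hk_H
            rw [chain_run_H, scan_run_key _ _ (show tokMapB.lookup 'H' = some ['H','H'] by decide)]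
            rw [ihr]
            simp
          by_cases hk_I : c2 = 'I'
          · subst hk_I
            rw [chain_run_I, scan_run_key _ _ (show tokMapB.lookup 'I' = some ['h','h'] by decide)]
            rw [ihr]
            simp
          by_cases hk_M : c2 = 'M'
          · subst hk_M
            rw [chain_run_M, scan_run_key _ _ (show tokMapB.lookup 'M' = some ['m','m'] by decide)]
            rw [ihr]
            simp
          by_cases hk_S : c2 = 'S'
          · subst hk_S
            rw [chain_run_S, scan_run_key _ _ (show tokMapB.lookup 'S' = some ['s','s'] by decide)]
            rw [ihr]
            simp
          by_cases hk_p : c2 = 'p'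
          · subst hk_p
            rw [chain_run_p, scan_run_key _ _ (show tokMapB.lookup 'p' = some ['A'] by decide)]
            rw [ihr]
            simp
          -- c2 matches no key
          · have hlook : tokMapB.lookup c2 = none := by
              simp [tokMapB, List.lookup, beq_eq_false_iff_ne.mpr hk_d, beq_eq_false_iff_ne.mpr hk_m, beq_eq_false_iff_ne.mpr hk_Y, beq_eq_false_iff_ne.mpr hk_y, beq_eq_false_iff_ne.mpr hk_B, beq_eq_false_iff_ne.mpr hk_b, beq_eq_false_iff_ne.mpr hk_A, beq_eq_false_iff_ne.mpr hk_a, beq_eq_false_iff_ne.mpr hk_H, beq_eq_false_iff_ne.mpr hk_I, beq_eq_false_iff_ne.mpr hk_M, beq_eq_false_iff_ne.mpr hk_S, beq_eq_false_iff_ne.mpr hk_p]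
            rw [chain_run_nonkey _ _ _ hc2 hk_d hk_m hk_Y hk_y hk_B hk_b hk_A hk_a hk_H hk_I hk_M hk_S hk_p]
            rw [scan_run_nonkey _ hlook hc2]
            rw [ihr]
      · have hbad' : ¬ badL t := not_badL_of_suffix _ t ⟨[c], rfl⟩ hbad
        rw [chain_cons_ne _ _ hc, scan_cons_ne _ _ hc]
        rw [ih t (by simp at hlen; omega) hbad']

-- ===== tightness: inside D_ the two programs always differ =====
-- B's output always contains "%M" there, A's output never does.

lemma infix_pm_append (v X : List Char) (hv : '%' ∉ v)
    (h : ['%','M'] <:+: v ++ X) : ['%','M'] <:+: X := by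
  induction v with
  | nil => simpa using h
  | cons a v' ih =>
    rcases List.infix_cons_iff.mp h with hp | hi
    · rcases List.cons_prefix_cons.mp hp with ⟨rfl, _⟩
      exact absurd (List.mem_cons_self) hv
    · exact ih (fun hm => hv (List.mem_cons_of_mem _ hm)) hi

lemma rep_no_pm (k : Char) (v : List Char) (hv0 : v ≠ []) (hv1 : '%' ∉ v)
    (hv2 : v.head? ≠ some 'M') :
    ∀ (n : Nat) (w : List Char), w.length ≤ n →
      (k = 'M' ∨ ¬ ['%','M'] <:+: w) → ¬ ['%','M'] <:+: repAux k v w := by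
  intro n
  induction n with
  | zero =>
    intro w hw _
    have : w = [] := List.eq_nil_of_length_eq_zero (Nat.le_zero.mp hw)
    subst this
    simp
  | succ n ih =>
    intro w hw hk
    cases w with
    | nil => simp
    | cons c t =>
      rw [repAux]
      by_cases hm : (['%', k].isPrefixOf (c :: t)) = true
      · simp only [hm, if_true]
        intro h
        obtain ⟨rfl, ht⟩ := List.cons_prefix_cons.mp (List.isPrefixOf_iff_prefix.mp hm)
        have h' := infix_pm_append v _ hv1 h
        cases t with
        | nil => simp at h'
        | cons d t' =>
          obtain ⟨rfl, -⟩ := List.cons_prefix_cons.mp ht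
          refine ih t' (by simp at hw ⊢; omega) ?_ (by simpa using h')
          rcases hk with hk | hk
          · exact Or.inl hk
          · exact Or.inr fun hi => hk (hi.trans ⟨['%', k], [], by simp⟩)
      · simp only [hm, if_false, Bool.false_eq_true]
        intro h
        rcases List.infix_cons_iff.mp h with hp | hi
        · rcases List.cons_prefix_cons.mp hp with ⟨rfl, hM⟩
          cases t with
          | nil => simp [List.prefix_nil] at hM
          | cons d t' =>
            rw [repAux] at hM
            by_cases hm2 : (['%', k].isPrefixOf (d :: t')) = true
            · simp only [hm2, if_true] at hM
              cases v with
              | nil => exact hv0 rfl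
              | cons x v'' =>
                obtain ⟨rfl, -⟩ := List.cons_prefix_cons.mp hM
                exact hv2 rfl
            · simp only [hm2, if_false, Bool.false_eq_true] at hM
              obtain ⟨rfl, -⟩ := List.cons_prefix_cons.mp hM
              rcases hk with rfl | hk
              · exact hm (by simp [List.isPrefixOf])
              · exact hk ⟨[], t', by simp⟩
        · rcases hk with hk | hk
          · exact ih t (by simp at hw; omega) (Or.inl hk) hi
          · exact ih t (by simp at hw; omega)
              (Or.inr fun hi' => hk (hi'.trans ⟨[c], [], by simp⟩)) hi

def chain10 (l : List Char) : List Char :=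
  (pairsC.take 10).foldl (fun r p => PySem.Chars.replace r p.1 p.2) l

lemma chain_decomp (l : List Char) :
    chainL l = repAux 'p' ['A']
      (repAux 'S' ['s','s'] (repAux 'M' ['m','m'] (chain10 l))) := by
  simp [chainL, chain10, pairsC, replace_eq_repAux]

lemma chain_no_pm (l : List Char) : ¬ ['%','M'] <:+: chainL l := by
  rw [chain_decomp]
  have h1 : ¬ ['%','M'] <:+: repAux 'M' ['m','m'] (chain10 l) :=
    rep_no_pm 'M' ['m','m'] (by simp) (by decide) (by decide) _ _ le_rfl (Or.inl rfl)
  have h2 : ¬ ['%','M'] <:+: repAux 'S' ['s','s'] (repAux 'M' ['m','m'] (chain10 l)) :=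
    rep_no_pm 'S' ['s','s'] (by simp) (by decide) (by decide) _ _ le_rfl (Or.inr h1)
  exact rep_no_pm 'p' ['A'] (by simp) (by decide) (by decide) _ _ le_rfl (Or.inr h2)

lemma scan_has_pm_aux : ∀ (n : Nat) (l : List Char), l.length ≤ n →
    ∀ (x : Char) (v' : List Char), tokMapB.lookup x = some ('M' :: v') →
      ['%','%',x] <:+: l → ['%','M'] <:+: scanB l := by
  intro n
  induction n with
  | zero =>
    intro l hl x v' hx h
    have : l = [] := List.eq_nil_of_length_eq_zero (Nat.le_zero.mp hl)
    subst this
    simp [List.infix_nil] at h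
  | succ n ih =>
    intro l hl x v' hx h
    cases l with
    | nil => simp [List.infix_nil] at h
    | cons c t =>
      have hxp : x ≠ '%' := by
        intro hxe; rw [hxe, lookup_pct_none] at hx; exact absurd hx (by simp)
      rcases List.infix_cons_iff.mp h with hp | hi
      · -- "%%x" sits at the front: scanB emits '%' then the value 'M' :: v'
        obtain ⟨rfl, hp2⟩ := List.cons_prefix_cons.mp hp
        cases t with
        | nil => simp [List.prefix_nil] at hp2
        | cons d t' =>
          obtain ⟨rfl, hp3⟩ := List.cons_prefix_cons.mp hp2
          cases t' with
          | nil => simp [List.prefix_nil] at hp3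
          | cons e t'' =>
            obtain ⟨rfl, -⟩ := List.cons_prefix_cons.mp hp3
            rw [scan_nonkey _ _ lookup_pct_none, scan_key _ _ _ hx]
            exact ⟨[], v' ++ scanB t'', by simp⟩
      · -- "%%x" sits inside t
        by_cases hc : c = '%'
        · subst hc
          cases t with
          | nil => simp [List.infix_nil] at hi
          | cons c2 t2 =>
            cases hv : tokMapB.lookup c2 with
            | some v0 =>
              have hc2 : c2 ≠ '%' := by
                intro he; rw [he, lookup_pct_none] at hv; exact absurd hv (by simp)
              rcases List.infix_cons_iff.mp hi with hp2 | hi2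
              · obtain ⟨he, -⟩ := List.cons_prefix_cons.mp hp2
                exact absurd he.symm hc2
              · have := ih t2 (by simp at hl ⊢; omega) x v' hx hi2
                rw [scan_key _ _ _ hv]
                exact this.trans ⟨v0, [], by simp⟩
            | none =>
              have := ih (c2 :: t2) (by simp at hl ⊢; omega) x v' hx hi
              rw [scan_nonkey _ _ hv]
              exact this.trans ⟨['%'], [], by simp⟩
        · have := ih t (by simp at hl ⊢; omega) x v' hx hi
          rw [scan_cons_ne _ _ hc]
          exact this.trans ⟨[c], [], by simp⟩

lemma scan_has_pm (l : List Char) (hb : badL l) : ['%','M'] <:+: scanB l := by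
  rcases hb with h | h | h
  · exact scan_has_pm_aux l.length l le_rfl 'm' ['M'] (by decide) h
  · exact scan_has_pm_aux l.length l le_rfl 'B' ['M','M','M'] (by decide) h
  · exact scan_has_pm_aux l.length l le_rfl 'b' ['M','M'] (by decide) h

lemma foldl_str_replace (ps : List (String × String)) (s : String) :
    ps.foldl (fun r p => PySem.Str.replace r p.1 p.2) s =
      String.ofList (ps.foldl
        (fun (r : List Char) p => PySem.Chars.replace r p.1.toList p.2.toList) s.toList) := by
  induction ps generalizing s with
  | nil => simp [String.ofList_toList]
  | cons p ps ih =>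
    simp only [List.foldl_cons]
    rw [ih, PySem.Str.toList_replace]

lemma A_eq_chain (fmt : String) :
    strftime_to_momentjs fmt = String.ofList (chainL fmt.toList) := by
  rw [strftime_to_momentjs, foldl_str_replace]
  congr 1

set_option maxRecDepth 40000 in
theorem strftime_to_momentjs_spec : Claim_unchanged_strftime_to_momentjs := by
  intro fmt _ hD
  have hb : ¬ badL fmt.toList := by
    intro hbad
    apply hD
    exact hbad.imp ((PySem.Str.isIn_iff_infix "%%m" fmt).mpr)
      (.imp ((PySem.Str.isIn_iff_infix "%%B" fmt).mpr) ((PySem.Str.isIn_iff_infix "%%b" fmt).mpr))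
  rw [A_eq_chain, chain_eq_scan fmt.toList.length fmt.toList le_rfl hb]
  rfl

set_option maxRecDepth 40000 in
theorem strftime_to_momentjs_changed : Claim_changed_strftime_to_momentjs := by
  unfold Claim_changed_strftime_to_momentjs; decide

theorem strftime_to_momentjs_tight : Claim_exact_strftime_to_momentjs := by
  intro fmt _ hD heq
  have hbad : badL fmt.toList :=
    hD.imp ((PySem.Str.isIn_iff_infix "%%m" fmt).mp)
      (.imp ((PySem.Str.isIn_iff_infix "%%B" fmt).mp) ((PySem.Str.isIn_iff_infix "%%b" fmt).mp))
  have e : chainL fmt.toList = scanB fmt.toList := by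
    have e0 := congrArg String.toList heq
    rw [A_eq_chain] at e0
    rw [show strftime_to_momentjs_alt fmt = String.ofList (scanB fmt.toList) from rfl] at e0
    simpa [String.toList_ofList] using e0
  exact chain_no_pm fmt.toList (e ▸ scan_has_pm fmt.toList hbad)
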